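-- pv_equiv track=rewrite | github.com/SynUW/BCWildfire | newset_processing/pre_processing.py | _normalize_include_folders
-- ===== SOURCE A (Python) =====
-- def _normalize_include_folders(arg_list):
--     if not arg_list: return None
--     toks = []
--     for item in arg_list:
--         if item is None: continue
--         s = str(item).strip()
--         if not s: continue
--         if ',' in s: toks.extend([t.strip() for t in s.split(',') if t.strip()])
--         else: toks.append(s)
--     return set(toks) if toks else None
-- ===== SOURCE B (Python) =====
-- def _normalize_include_folders(arg_list):
--     combined = ','.join(str(x).strip() for x in arg_list if x is not None)
--     toks = [t.strip() for t in combined.split(',') if t.strip()]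
--     return set(toks) if toks else None
-- ===== Notes on version B (the rewrite author's own statement) =====
-- stated objective: simpler
-- what changed: Replaces the per-item loop with its 'if comma in item' conditional-split branch by one join of all stripped items into a single comma-string followed by a single split+strip+filter pass.
import Mathlib
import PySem

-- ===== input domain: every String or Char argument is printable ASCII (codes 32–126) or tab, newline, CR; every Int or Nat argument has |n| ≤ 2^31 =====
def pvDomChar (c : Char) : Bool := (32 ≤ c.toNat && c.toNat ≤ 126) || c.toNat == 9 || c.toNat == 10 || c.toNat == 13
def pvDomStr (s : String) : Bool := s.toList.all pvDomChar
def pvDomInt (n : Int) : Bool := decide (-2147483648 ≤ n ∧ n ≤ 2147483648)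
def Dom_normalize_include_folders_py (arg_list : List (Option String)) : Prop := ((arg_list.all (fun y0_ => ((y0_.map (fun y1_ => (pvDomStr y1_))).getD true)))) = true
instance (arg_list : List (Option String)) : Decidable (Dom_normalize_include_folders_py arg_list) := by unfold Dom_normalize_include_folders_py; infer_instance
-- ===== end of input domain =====

-- B replaces A's per-item branch-on-comma loop by one join into a single comma-string plus one split+strip+filter pass (objective: simpler; same return value).

-- ===== PORT A =====
-- literal transliteration of A: early guard, loop with continue/branches, set(toks) at the end.
-- s.split(',') is ported as (PySem.Str.split? s ",").getD [] — split? is never none since the separator "," is nonempty.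
def normalize_include_folders_py (arg_list : List (Option String)) : Option (List String) :=
  if arg_list = [] then none
  else
    let toks := arg_list.foldl (fun toks item =>
      match item with
      | none => toks                                   -- if item is None: continue
      | some it =>
        let s := PySem.Str.strip it                    -- s = str(item).strip()  (str() is identity on str)
        if s = "" then toks                            -- if not s: continue
        else if PySem.Str.isIn "," s then              -- if ',' in s
          toks ++ ((((PySem.Str.split? s ",").getD []).filter
                      (fun t => PySem.Str.strip t ≠ "")).map (fun t => PySem.Str.strip t))
        else toks ++ [s]) []
    if toks = [] then none else some (PySem.Set.ofList toks)

-- ===== PORT B =====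
def normalize_include_folders_py_alt (arg_list : List (Option String)) : Option (List String) :=
  let combined := PySem.Str.join "," (arg_list.filterMap (fun x => x.map (fun y => PySem.Str.strip y)))
  let toks := (((PySem.Str.split? combined ",").getD []).filter
                 (fun t => PySem.Str.strip t ≠ "")).map (fun t => PySem.Str.strip t)
  if toks = [] then none else some (PySem.Set.ofList toks)

-- ===== PRECONDITION & SPEC =====
def Spec_normalize_include_folders_py (arg_list : List (Option String)) (out : Option (List String)) : Prop := out = normalize_include_folders_py_alt arg_list
instance (arg_list : List (Option String)) (out : Option (List String)) : Decidable (Spec_normalize_include_folders_py arg_list out) := by unfold Spec_normalize_include_folders_py; infer_instance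

-- ===== CLAIM (what is proved, stated in full; the proofs are below) =====
def Claim_equal_normalize_include_folders_py : Prop := ∀ (arg_list : List (Option String)), Dom_normalize_include_folders_py arg_list → Spec_normalize_include_folders_py arg_list (normalize_include_folders_py arg_list)

-- ===== LEMMAS AND PROOFS =====

def mySplit : List Char → List (List Char)
  | [] => [[]]
  | c :: rest =>
    if c = ',' then [] :: mySplit rest
    else
      match mySplit rest with
      | [] => [[c]]
      | t :: ts => (c :: t) :: ts

theorem mySplit_ne_nil (s : List Char) : mySplit s ≠ [] := by
  cases s with
  | nil => simp [mySplit]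
  | cons c rest =>
    simp only [mySplit]
    split
    · simp
    · split <;> simp_all

theorem go_eq (fuel : Nat) : ∀ (l cur : List Char) (acc : List (List Char)), l.length ≤ fuel →
    PySem.Chars.splitOn.go [','] fuel l cur acc =
      acc.reverse ++ (match mySplit l with
        | [] => [cur.reverse]
        | t :: ts => (cur.reverse ++ t) :: ts) := by
  induction fuel with
  | zero =>
    intro l cur acc h
    have : l = [] := by cases l <;> simp_all
    subst this
    simp [PySem.Chars.splitOn.go, mySplit]
  | succ n ih =>
    intro l cur acc h
    cases l with
    | nil => simp [PySem.Chars.splitOn.go, mySplit]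
    | cons c rest =>
      simp only [PySem.Chars.splitOn.go]
      by_cases hc : c = ','
      · subst hc
        rw [if_pos (by simp [List.isPrefixOf])]
        show PySem.Chars.splitOn.go [','] n rest [] (cur.reverse :: acc) = _
        rw [ih rest [] (cur.reverse :: acc) (by simpa using h)]
        simp only [mySplit, reduceIte]
        rcases hms : mySplit rest with _ | ⟨t, ts⟩
        · exact absurd hms (mySplit_ne_nil rest)
        · simp
      · rw [if_neg (by simp [List.isPrefixOf]; intro h'; exact hc h'.symm)]
        rw [ih rest (c :: cur) acc (by simpa using Nat.le_of_succ_le_succ (by simpa using h))]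
        simp only [mySplit, if_neg hc]
        rcases hms : mySplit rest with _ | ⟨t, ts⟩
        · exact absurd hms (mySplit_ne_nil rest)
        · simp

theorem splitOn_comma_eq (s : List Char) : PySem.Chars.splitOn s [','] = mySplit s := by
  unfold PySem.Chars.splitOn
  rw [go_eq (s.length + 1) s [] [] (by omega)]
  rcases hms : mySplit s with _ | ⟨t, ts⟩
  · exact absurd hms (mySplit_ne_nil s)
  · simp

theorem mySplit_append (a b : List Char) : mySplit (a ++ ',' :: b) = mySplit a ++ mySplit b := by
  induction a with
  | nil => simp [mySplit]
  | cons c rest ih =>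
    by_cases hc : c = ','
    · subst hc; simp [mySplit, ih]
    · simp only [List.cons_append, mySplit, if_neg hc, ih]
      rcases hms : mySplit rest with _ | ⟨t, ts⟩
      · exact absurd hms (mySplit_ne_nil rest)
      · simp

theorem mySplit_no_comma (s : List Char) (h : ',' ∉ s) : mySplit s = [s] := by
  induction s with
  | nil => simp [mySplit]
  | cons c rest ih =>
    simp only [List.mem_cons, not_or] at h
    have hc : ¬ c = ',' := fun hh => h.1 hh.symm
    simp [mySplit, hc, ih h.2]

theorem dropWhile_dropWhile_self {p : Char → Bool} (l : List Char) :
    List.dropWhile p (List.dropWhile p l) = List.dropWhile p l := by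
  rw [List.dropWhile_eq_self_iff]
  intro hl hp
  have := List.head_dropWhile_not p (l := l) (by intro h; rw [h] at hl; simp at hl)
  rw [List.head_eq_getElem] at this
  simp_all

theorem strip_idem (s : List Char) : PySem.Chars.strip (PySem.Chars.strip s) = PySem.Chars.strip s := by
  unfold PySem.Chars.strip PySem.Chars.rstrip PySem.Chars.lstrip
  set p := PySem.Chars.isspace
  set u := List.dropWhile p s with hu
  set r := List.dropWhile p u.reverse with hr
  have h1 : List.dropWhile p r.reverse = r.reverse := by
    rw [List.dropWhile_eq_self_iff]
    intro hl hp
    have hrne : r ≠ [] := by intro h; rw [h] at hl; simp at hl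
    have hune : u.reverse ≠ [] := by
      intro h; rw [hr, h] at hrne; simp at hrne
    have hsuf : r <:+ u.reverse := by rw [hr]; exact List.dropWhile_suffix p
    have hlast : r.getLast hrne = u.reverse.getLast hune := hsuf.getLast hrne
    have hhead : u.reverse.getLast hune = u.head (by simpa using hune) := by
      simp [List.getLast_reverse]
    have hnp : p (u.head (by simpa using hune)) = false :=
      List.head_dropWhile_not p _
    have : (r.reverse)[0] = r.getLast hrne := by
      simp [List.getElem_reverse, List.getLast_eq_getElem]
    rw [this, hlast, hhead, hnp] at hp
    simp at hp
  rw [h1, List.reverse_reverse, hr, dropWhile_dropWhile_self]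

-- tokStr s: the token list a piece of text contributes (split on ',', strip, drop empties); same shape as the ports' expression
def tokStr (s : String) : List String :=
  (((PySem.Str.split? s ",").getD []).filter (fun t => PySem.Str.strip t ≠ "")).map (fun t => PySem.Str.strip t)

def tokC (cs : List Char) : List (List Char) :=
  ((mySplit cs).filter (fun t => PySem.Chars.strip t ≠ [])).map PySem.Chars.strip

def gOpt : Option String → List String
  | none => []
  | some it => tokStr (PySem.Str.strip it)

theorem strip_str_idem (s : String) : PySem.Str.strip (PySem.Str.strip s) = PySem.Str.strip s := by
  apply String.toList_inj.mp
  simp [PySem.Str.toList_strip, strip_idem]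

theorem split?_comma (s : String) : PySem.Str.split? s "," = some ((mySplit s.toList).map String.ofList) := by
  simp [PySem.Str.split?, PySem.Chars.split?, splitOn_comma_eq]

theorem strip_ofList (cs : List Char) :
    PySem.Str.strip (String.ofList cs) = String.ofList (PySem.Chars.strip cs) := by
  simp [PySem.Str.strip]

theorem tokStr_eq (s : String) : tokStr s = (tokC s.toList).map String.ofList := by
  unfold tokStr tokC
  rw [split?_comma]
  simp only [Option.getD_some, List.filter_map, List.map_map]
  have hcond : ((fun t => decide (PySem.Str.strip t ≠ "")) ∘ String.ofList)
      = (fun cs => decide (PySem.Chars.strip cs ≠ [])) := by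
    funext cs
    simp [Function.comp, strip_ofList]
  have hmap : ((fun t => PySem.Str.strip t) ∘ String.ofList)
      = (String.ofList ∘ PySem.Chars.strip) := by
    funext cs
    simp [Function.comp, strip_ofList]
  rw [hcond, hmap, ← List.map_map]

theorem tokC_join : ∀ (ps : List (List Char)), tokC (PySem.Chars.join [','] ps) = ps.flatMap tokC
  | [] => by decide
  | [p] => by
    rw [show PySem.Chars.join [','] [p] = p from PySem.Chars.join_singleton _ _]
    simp
  | p :: q :: ps => by
    rw [PySem.Chars.join_cons_cons]
    have h : p ++ [','] ++ PySem.Chars.join [','] (q :: ps)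
        = p ++ (',' :: PySem.Chars.join [','] (q :: ps)) := by simp
    rw [h, List.flatMap_cons, ← tokC_join (q :: ps)]
    unfold tokC
    rw [mySplit_append, List.filter_append, List.map_append]

theorem tokStr_join (parts : List String) :
    tokStr (PySem.Str.join "," parts) = parts.flatMap tokStr := by
  rw [tokStr_eq, PySem.Str.toList_join]
  rw [show (",").toList = [','] from rfl, tokC_join]
  rw [List.map_flatMap, List.flatMap_map]
  apply List.flatMap_congr
  intro s _
  exact (tokStr_eq s).symm

theorem tokStr_empty : tokStr "" = [] := by decide

theorem tokStr_stripped (s : String) (hs : PySem.Str.strip s = s) (hne : s ≠ "")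
    (hnc : PySem.Str.isIn "," s = false) : tokStr s = [s] := by
  have hmem : ',' ∉ s.toList := by
    intro hmem
    have ht : PySem.Str.isIn "," s = true := by
      rw [PySem.Str.isIn_iff_infix]
      exact (List.singleton_infix_iff ',' s.toList).mpr hmem
    rw [ht] at hnc
    exact Bool.noConfusion hnc
  unfold tokStr
  rw [split?_comma, mySplit_no_comma _ hmem]
  simp [String.ofList_toList, hs, hne]

theorem A_loop : ∀ (l : List (Option String)) (toks : List String),
    l.foldl (fun toks item => match item with
      | none => toks
      | some it =>
        let s := PySem.Str.strip it
        if s = "" then toks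
        else if PySem.Str.isIn "," s then
          toks ++ ((((PySem.Str.split? s ",").getD []).filter
                      (fun t => PySem.Str.strip t ≠ "")).map (fun t => PySem.Str.strip t))
        else toks ++ [s]) toks = toks ++ l.flatMap gOpt := by
  intro l
  induction l with
  | nil => intro toks; simp
  | cons o rest ih =>
    intro toks
    cases o with
    | none => simpa [gOpt] using ih toks
    | some it =>
      simp only [List.foldl_cons, List.flatMap_cons]
      by_cases h1 : PySem.Str.strip it = ""
      · rw [show gOpt (some it) = [] from by simp [gOpt, h1, tokStr_empty]]
        simp only [h1, reduceIte]
        simpa using ih toks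
      · by_cases h2 : PySem.Str.isIn "," (PySem.Str.strip it)
        · simp only [if_neg h1, if_pos h2]
          rw [ih]
          have : gOpt (some it) = tokStr (PySem.Str.strip it) := rfl
          rw [this]
          unfold tokStr
          simp [List.append_assoc]
        · simp only [if_neg h1, if_neg h2]
          rw [ih]
          have : gOpt (some it) = [PySem.Str.strip it] := by
            show tokStr (PySem.Str.strip it) = _
            exact tokStr_stripped _ (strip_str_idem it) h1 (by simpa using h2)
          simp [this, List.append_assoc]

theorem flatMap_filterMap_strip (l : List (Option String)) :
    (l.filterMap (fun x => x.map (fun y => PySem.Str.strip y))).flatMap tokStr = l.flatMap gOpt := by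
  induction l with
  | nil => rfl
  | cons o rest ih =>
    cases o with
    | none => simpa [gOpt] using ih
    | some it => simp [gOpt, ih]

theorem alt_eq (arg_list : List (Option String)) :
    normalize_include_folders_py_alt arg_list
      = (if arg_list.flatMap gOpt = [] then none
         else some (PySem.Set.ofList (arg_list.flatMap gOpt))) := by
  unfold normalize_include_folders_py_alt
  show (let toks := tokStr (PySem.Str.join ","
          (arg_list.filterMap (fun x => x.map (fun y => PySem.Str.strip y))));
        if toks = [] then none else some (PySem.Set.ofList toks)) = _
  rw [tokStr_join, flatMap_filterMap_strip]

theorem a_eq (arg_list : List (Option String)) (h : arg_list ≠ []) :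
    normalize_include_folders_py arg_list
      = (if arg_list.flatMap gOpt = [] then none
         else some (PySem.Set.ofList (arg_list.flatMap gOpt))) := by
  unfold normalize_include_folders_py
  rw [if_neg h]
  show (let toks := arg_list.foldl _ [];
        if toks = [] then none else some (PySem.Set.ofList toks)) = _
  rw [A_loop]
  simp

-- ===== VERDICT (by name: the statement is the Claim_ definition above) =====
theorem normalize_include_folders_py_spec : Claim_equal_normalize_include_folders_py := by
  intro arg_list _
  unfold Spec_normalize_include_folders_py
  by_cases harg : arg_list = []
  · subst harg; decide
  · rw [a_eq arg_list harg, alt_eq]
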